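-- pv_equiv track=rewrite | github.com/SwagLyrics/autosynch | autosynch/syllable_counter.py | build_lyrics
-- ===== SOURCE A (Python) =====
-- def build_lyrics(lyrics):
--     """
--     Constructs segmented lyrics structure by song section, line, and word.
--
--     Returns of list of tuples representing sections, each of which contains
--     a list of lists representing lines of lyrics, each of which is a list of
--     words in that line. The first element of the tuple is the section's
--     category (i.e., chorus, verse, etc.). The second element is the section
--     lyrics themselves.
--
--     :param lyrics: Lyrics in format of Genius.com.
--     :type lyrics: str
--     :return formatted_lyrics: Lyrics in segmented format.
--     :rtype: list[tuple(str, list[list[str]])]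
--     """
--
--     formatted_lyrics = []
--     section = []
--     section_type = 'default'
--
--     lines = lyrics.splitlines()
--     for line in lines:
--         # Check for section header
--         if line.startswith('[') and line.endswith(']'):
--             # Append section to lyrics
--             if section:
--                 formatted_lyrics.append((section_type, section[:]))
--                 section.clear()
--
--             # Get next section type
--             if 'Chorus' in line:
--                 section_type = 'chorus'
--             elif 'Verse' in line:
--                 section_type = 'verse'
--             elif 'Produced' in line or 'Instrumental' in line:
--                 continue
--             elif 'Bridge' in line or 'Hook' in line:
--                 section_type = 'bridge'
--             else:
--                 section_type = 'intro'
--         elif line: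
--             # Convert -, —, and / compounds into two words
--             line = line.replace('-', ' ').replace('—', ' ').replace('/', ' ')
--
--             # Append line to section
--             section.append([word for word in line.split()])
--     formatted_lyrics.append((section_type, section))
--
--     return formatted_lyrics
-- ===== SOURCE B (Python) =====
-- def _next_type(header, current):
--     if 'Chorus' in header:
--         return 'chorus'
--     if 'Verse' in header:
--         return 'verse'
--     if 'Produced' in header or 'Instrumental' in header:
--         return current
--     if 'Bridge' in header or 'Hook' in header:
--         return 'bridge'
--     return 'intro'
--
--
-- def _content(block):
--     """Word-split the nonempty lines of a block of raw lines."""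
--     return [line.replace('-', ' ').replace('—', ' ').replace('/', ' ').split()
--             for line in block if line]
--
--
-- def build_lyrics(lyrics):
--     # Outer loop over whole sections: scan ahead to the next header line,
--     # slice out the block between headers, emit it, then jump past the header.
--     lines = lyrics.splitlines()
--     n = len(lines)
--     out = []
--     ty = 'default'
--     i = 0
--     while True:
--         j = i
--         while j < n and not (lines[j].startswith('[') and lines[j].endswith(']')):
--             j += 1
--         block = _content(lines[i:j])
--         if j == n:
--             out.append((ty, block))  # final block, even if empty
--             return out
--         if block:
--             out.append((ty, block))
--         ty = _next_type(lines[j], ty)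
--         i = j + 1
-- ===== Notes on version B (the rewrite author's own statement) =====
-- stated objective: alternative
-- what changed: A is a single flat loop over lines with a section accumulator flushed at each header; B iterates over whole sections: it scans ahead to the next header line, slices out the block between headers, word-splits it wholesale and emits it, so there is no running accumulator or flush logic.
import Mathlib
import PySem

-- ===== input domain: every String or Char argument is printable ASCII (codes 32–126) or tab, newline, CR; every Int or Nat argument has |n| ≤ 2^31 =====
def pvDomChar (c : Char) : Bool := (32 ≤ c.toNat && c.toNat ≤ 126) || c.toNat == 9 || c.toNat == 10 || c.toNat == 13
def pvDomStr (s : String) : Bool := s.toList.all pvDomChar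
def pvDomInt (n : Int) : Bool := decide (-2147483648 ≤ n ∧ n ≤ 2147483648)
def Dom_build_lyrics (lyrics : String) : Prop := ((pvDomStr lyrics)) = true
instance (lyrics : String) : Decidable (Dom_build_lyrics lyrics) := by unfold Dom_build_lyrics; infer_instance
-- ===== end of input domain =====

-- B replaces A's flat stateful loop (section accumulator flushed at each header) by an outer
-- iteration over whole sections: scan to the next header, slice out the block, emit it wholesale.

-- ===== PORT A =====
-- A's single loop: state (formatted_lyrics, section, section_type); lines split into words as appended.
def pvStepA (st : List (String × List (List String)) × List (List String) × String) (line : String) :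
    List (String × List (List String)) × List (List String) × String :=
  match st with
  | (fl, sec, ty) =>
    if PySem.Str.startswith line "[" && PySem.Str.endswith line "]" then
      let fl' := if sec = [] then fl else fl ++ [(ty, sec)]
      let ty' :=
        if PySem.Str.isIn "Chorus" line then "chorus"
        else if PySem.Str.isIn "Verse" line then "verse"
        else if PySem.Str.isIn "Produced" line || PySem.Str.isIn "Instrumental" line then ty
        else if PySem.Str.isIn "Bridge" line || PySem.Str.isIn "Hook" line then "bridge"
        else "intro"
      (fl', [], ty')
    else if line ≠ "" then
      (fl, sec ++ [PySem.Str.split₀ (PySem.Str.replace (PySem.Str.replace (PySem.Str.replace line "-" " ") "—" " ") "/" " ")], ty)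
    else (fl, sec, ty)

def build_lyrics (lyrics : String) : List (String × List (List String)) :=
  let st := (PySem.Str.splitlines lyrics).foldl pvStepA ([], [], "default")
  st.1 ++ [(st.2.2, st.2.1)]

-- ===== PORT B =====
def pvIsHeader (l : String) : Bool := PySem.Str.startswith l "[" && PySem.Str.endswith l "]"

def pvNextType (header : String) (current : String) : String :=
  if PySem.Str.isIn "Chorus" header then "chorus"
  else if PySem.Str.isIn "Verse" header then "verse"
  else if PySem.Str.isIn "Produced" header || PySem.Str.isIn "Instrumental" header then current
  else if PySem.Str.isIn "Bridge" header || PySem.Str.isIn "Hook" header then "bridge"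
  else "intro"

-- `_content`: word-split the nonempty lines of a raw block
def pvContent (block : List String) : List (List String) :=
  (block.filter (fun l => l ≠ "")).map
    (fun l => PySem.Str.split₀ (PySem.Str.replace (PySem.Str.replace (PySem.Str.replace l "-" " ") "—" " ") "/" " "))

-- B's outer loop over sections: the inner scan-to-next-header + slice is rendered as
-- takeWhile/dropWhile on the non-header predicate; recursion = the outer `while True`.
def pvGo (lines : List String) (ty : String) : List (String × List (List String)) :=
  let pre := lines.takeWhile (fun l => !pvIsHeader l)
  match hdw : lines.dropWhile (fun l => !pvIsHeader l) with
  | [] => [(ty, pvContent pre)]  -- final block, even if empty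
  | h :: rest =>
      (if pvContent pre = [] then [] else [(ty, pvContent pre)]) ++ pvGo rest (pvNextType h ty)
termination_by lines.length
decreasing_by
  have hlen := congrArg List.length (List.takeWhile_append_dropWhile (p := fun l => !pvIsHeader l) (l := lines))
  rw [hdw] at hlen
  simp [List.length_append] at hlen
  omega

def build_lyrics_alt (lyrics : String) : List (String × List (List String)) :=
  pvGo (PySem.Str.splitlines lyrics) "default"

-- ===== PRECONDITION & SPEC =====
def Spec_build_lyrics (lyrics : String) (out : List (String × List (List String))) : Prop := out = build_lyrics_alt lyrics
instance (lyrics : String) (out : List (String × List (List String))) : Decidable (Spec_build_lyrics lyrics out) := by unfold Spec_build_lyrics; infer_instance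

-- ===== CLAIM (what is proved, stated in full; the proofs are below) =====
def Claim_equal_build_lyrics : Prop := ∀ (lyrics : String), Dom_build_lyrics lyrics → Spec_build_lyrics lyrics (build_lyrics lyrics)

-- ===== LEMMAS AND PROOFS =====

-- the first element kept by dropWhile fails the predicate
theorem pvDropWhile_head_false (p : String → Bool) :
    ∀ (l : List String) (h : String) (rest : List String), l.dropWhile p = h :: rest → p h = false := by
  intro l
  induction l with
  | nil => intro h rest hx; simp at hx
  | cons a t ih =>
    intro h rest hx
    by_cases hp : p a = true
    · rw [List.dropWhile_cons_of_pos hp] at hx; exact ih h rest hx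
    · rw [List.dropWhile_cons_of_neg hp] at hx
      cases hx; simpa using hp

-- unfolding lemmas for pvGo's dependent match
theorem pvGo_drop_nil (lines : List String) (ty : String)
    (hdw : lines.dropWhile (fun l => !pvIsHeader l) = []) :
    pvGo lines ty = [(ty, pvContent (lines.takeWhile (fun l => !pvIsHeader l)))] := by
  rw [pvGo]
  split
  · rfl
  · rename_i h rest heq
    rw [hdw] at heq
    cases heq

theorem pvGo_drop_cons (lines : List String) (ty : String) (h : String) (rest : List String)
    (hdw : lines.dropWhile (fun l => !pvIsHeader l) = h :: rest) :
    pvGo lines ty =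
      (if pvContent (lines.takeWhile (fun l => !pvIsHeader l)) = [] then []
       else [(ty, pvContent (lines.takeWhile (fun l => !pvIsHeader l)))]) ++ pvGo rest (pvNextType h ty) := by
  rw [pvGo]
  split
  · rename_i heq
    rw [hdw] at heq
    cases heq
  · rename_i h' rest' heq
    rw [hdw] at heq
    cases heq
    rfl

-- A's loop over a header-free prefix just appends the prefix's content to the section.
theorem pvFold_headerFree (pre : List String) (hpre : ∀ l ∈ pre, pvIsHeader l = false) :
    ∀ (fl : List (String × List (List String))) (sec : List (List String)) (ty : String),
    pre.foldl pvStepA (fl, sec, ty) = (fl, sec ++ pvContent pre, ty) := by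
  induction pre with
  | nil => intro fl sec ty; simp [pvContent]
  | cons l t ih =>
    intro fl sec ty
    have hl : pvIsHeader l = false := hpre l (by simp)
    have ht : ∀ x ∈ t, pvIsHeader x = false := fun x hx => hpre x (by simp [hx])
    simp only [List.foldl_cons]
    by_cases he : l = ""
    · subst he
      have hf : (PySem.Str.startswith "" "[" && PySem.Str.endswith "" "]") = false := by decide
      have : pvStepA (fl, sec, ty) "" = (fl, sec, ty) := by
        simp only [pvStepA, hf]
        simp
      rw [this, ih ht]
      simp [pvContent]
    · have : pvStepA (fl, sec, ty) l =
        (fl, sec ++ [PySem.Str.split₀ (PySem.Str.replace (PySem.Str.replace (PySem.Str.replace l "-" " ") "—" " ") "/" " ")], ty) := by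
        simp only [pvStepA, pvIsHeader] at hl ⊢
        rw [hl]
        simp [he]
      rw [this, ih ht]
      simp [pvContent, he]
  
-- Main invariant: starting A's loop with an empty section, finishing it with the unconditional
-- final append equals B's section-at-a-time recursion, prefixed by the output so far.
theorem pvMain : ∀ (n : Nat) (lines : List String), lines.length ≤ n →
    ∀ (fl : List (String × List (List String))) (ty : String),
    (lines.foldl pvStepA (fl, [], ty)).1
      ++ [((lines.foldl pvStepA (fl, [], ty)).2.2, (lines.foldl pvStepA (fl, [], ty)).2.1)]
      = fl ++ pvGo lines ty := by
  intro n
  induction n with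
  | zero =>
    intro lines hlen fl ty
    have : lines = [] := List.eq_nil_of_length_eq_zero (Nat.le_zero.mp hlen)
    subst this
    rw [pvGo]
    simp [pvContent]
  | succ m ih =>
    intro lines hlen fl ty
    have hsplit := List.takeWhile_append_dropWhile (p := fun l => !pvIsHeader l) (l := lines)
    set pre := lines.takeWhile (fun l => !pvIsHeader l) with hpre_def
    have hpreF : ∀ l ∈ pre, pvIsHeader l = false := by
      intro l hl
      have := List.mem_takeWhile_imp hl
      simpa using this
    cases hdw : lines.dropWhile (fun l => !pvIsHeader l) with
    | nil =>
      have hlines : lines = pre := by rw [← hsplit, hdw, List.append_nil]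
      rw [pvGo_drop_nil lines ty hdw, ← hpre_def]
      rw [hlines, pvFold_headerFree pre hpreF]
      simp
    | cons h rest =>
      have hh : pvIsHeader h = true := by
        have := pvDropWhile_head_false (fun l => !pvIsHeader l) lines h rest hdw
        simpa using this
      have hlines : lines = pre ++ h :: rest := by rw [← hsplit, hdw]
      have hrest : rest.length ≤ m := by
        have := congrArg List.length hlines
        simp [List.length_append] at this
        omega
      rw [pvGo_drop_cons lines ty h rest hdw, ← hpre_def]
      conv_lhs => rw [hlines]
      rw [List.foldl_append, pvFold_headerFree pre hpreF, List.foldl_cons]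
      have hstep : pvStepA (fl, [] ++ pvContent pre, ty) h =
          ((if pvContent pre = [] then fl else fl ++ [(ty, pvContent pre)]), [], pvNextType h ty) := by
        simp only [pvStepA, pvNextType, pvIsHeader] at hh ⊢
        rw [hh]
        simp
      rw [hstep, ih rest hrest]
      by_cases hc : pvContent pre = [] <;> simp [hc]

-- ===== VERDICT (by name: the statement is the Claim_ definition above) =====
theorem build_lyrics_spec : Claim_equal_build_lyrics := by
  intro lyrics _
  unfold Spec_build_lyrics build_lyrics build_lyrics_alt
  exact pvMain (PySem.Str.splitlines lyrics).length _ le_rfl [] "default"
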